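-- pv_equiv track=rewrite | github.com/hansq7777/registration_pipeline | mri/scripts/template_register_multistart.py | _seed_list
-- ===== SOURCE A (Python) =====
-- def _seed_list(seed_text: str) -> list[int]:
--     out: list[int] = []
--     seen: set[int] = set()
--     for token in seed_text.replace(";", ",").split(","):
--         token = token.strip()
--         if not token:
--             continue
--         try:
--             seed = int(token)
--         except ValueError:
--             continue
--         if seed in seen:
--             continue
--         out.append(seed)
--         seen.add(seed)
--     return out
-- ===== SOURCE B (Python) =====
-- def _seed_list(seed_text: str) -> list[int]:
--     # Consume the token list back-to-front with an explicit while/pop loop,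
--     # prepending each parsed integer and filtering its later duplicates out of
--     # the already-built result: an earlier occurrence always supersedes later
--     # ones, so first-occurrence order emerges without any seen-set.
--     tokens = seed_text.replace(";", ",").split(",")
--     res: list[int] = []
--     while tokens:
--         t = tokens.pop().strip()
--         if not t:
--             continue
--         try:
--             v = int(t)
--         except ValueError:
--             continue
--         res = [v] + [x for x in res if x != v]
--     return res
-- ===== Notes on version B (the rewrite author's own statement) =====
-- stated objective: alternative
-- what changed: Replaces the forward loop with a seen-set by a while/pop loop that consumes the token list back-to-front, prepending each parsed integer and filtering its later duplicates out of the accumulated result, so first-occurrence order emerges with no auxiliary set.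
import Mathlib
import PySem

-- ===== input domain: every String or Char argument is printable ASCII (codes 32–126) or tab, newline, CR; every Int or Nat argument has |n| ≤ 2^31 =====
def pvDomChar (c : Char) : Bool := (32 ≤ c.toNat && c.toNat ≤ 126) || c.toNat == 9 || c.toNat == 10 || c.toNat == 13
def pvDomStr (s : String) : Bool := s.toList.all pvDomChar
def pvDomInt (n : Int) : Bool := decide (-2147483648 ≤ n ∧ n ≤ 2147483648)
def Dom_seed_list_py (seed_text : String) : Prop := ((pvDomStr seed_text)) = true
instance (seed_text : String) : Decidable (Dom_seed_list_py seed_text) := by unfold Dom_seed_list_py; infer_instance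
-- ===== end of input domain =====

-- B replaces A's forward loop with a seen-set by a while/pop loop that consumes the
-- tokens back-to-front, prepending each parsed integer and filtering its later
-- duplicates out of the accumulated result (objective: alternative, same result).

-- ===== PORT A =====
-- A's loop body: strip, skip empty, try int(token) (none = ValueError), dedup with `seen`.
def pvStepA (st : List Int × PySem.Set Int) (token : String) : List Int × PySem.Set Int :=
  let token := PySem.Str.strip token
  if token = "" then st
  else
    match PySem.Int.ofStr? token with
    | none => st
    | some seed =>
      if st.2.contains seed then st
      else (st.1 ++ [seed], st.2.add seed)

def seed_list_py (seed_text : String) : List Int :=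
  -- split? is total here: the separator "," is non-empty, .getD [] is never taken
  (((PySem.Str.split? (PySem.Str.replace seed_text ";" ",") ",").getD []).foldl
    pvStepA ([], PySem.Set.empty)).1

-- ===== PORT B =====
-- B's while-loop: `tokens.pop()` takes tokens from the END, so the loop is the
-- structural recursion over the REVERSED token list; the body strips, skips empty,
-- tries int(t) (none = skipped ValueError), then res = [v] + [x for x in res if x != v].
def pvWhileB : List String → List Int → List Int
  | [], res => res
  | t :: ts, res =>
    let t := PySem.Str.strip t
    if t = "" then pvWhileB ts res
    else
      match PySem.Int.ofStr? t with
      | none => pvWhileB ts res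
      | some v => pvWhileB ts (v :: res.filter (fun x => x ≠ v))

def seed_list_py_alt (seed_text : String) : List Int :=
  -- split? is total here: the separator "," is non-empty, .getD [] is never taken
  pvWhileB ((PySem.Str.split? (PySem.Str.replace seed_text ";" ",") ",").getD []).reverse []

-- ===== PRECONDITION & SPEC =====
def Spec_seed_list_py (seed_text : String) (out : List Int) : Prop := out = seed_list_py_alt seed_text
instance (seed_text : String) (out : List Int) : Decidable (Spec_seed_list_py seed_text out) := by unfold Spec_seed_list_py; infer_instance

-- ===== CLAIM (what is proved, stated in full; the proofs are below) =====
def Claim_equal_seed_list_py : Prop := ∀ (seed_text : String), Dom_seed_list_py seed_text → Spec_seed_list_py seed_text (seed_list_py seed_text)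

-- ===== LEMMAS AND PROOFS =====

-- the per-token parse both loops share: strip, then int(token) if non-empty
def pvParse (token : String) : Option Int :=
  let token := PySem.Str.strip token
  if token = "" then none else PySem.Int.ofStr? token

-- A-side invariant: `seen` always equals `out` (as the same list), and the loop is
-- exactly Set.add folded over the parsed integers.
theorem pvStepA_loop (toks : List String) (acc : List Int) :
    toks.foldl pvStepA (acc, acc) =
      ((toks.filterMap pvParse).foldl PySem.Set.add acc,
       (toks.filterMap pvParse).foldl PySem.Set.add acc) := by
  induction toks generalizing acc with
  | nil => rfl
  | cons t ts ih =>
    simp only [List.foldl_cons, List.filterMap_cons]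
    have hstep : pvStepA (acc, acc) t =
        (match pvParse t with
         | none => (acc, acc)
         | some v => (PySem.Set.add acc v, PySem.Set.add acc v)) := by
      unfold pvStepA pvParse PySem.Set.add
      cases h : (if PySem.Str.strip t = "" then (none : Option Int)
                 else PySem.Int.ofStr? (PySem.Str.strip t)) <;>
        simp_all <;> split_ifs <;> simp_all
    rw [hstep]
    cases h : pvParse t with
    | none => simpa using ih acc
    | some v => simpa using ih (PySem.Set.add acc v)

-- B-side: the while loop is a fold of `v :: res.filter (· ≠ v)` over the parsed ints.
theorem pvWhileB_eq_foldl (toks : List String) (res : List Int) :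
    pvWhileB toks res =
      (toks.filterMap pvParse).foldl (fun r v => v :: r.filter (fun x => x ≠ v)) res := by
  induction toks generalizing res with
  | nil => rfl
  | cons t ts ih =>
    simp only [pvWhileB, List.filterMap_cons]
    by_cases h1 : PySem.Str.strip t = ""
    · have hp : pvParse t = none := by simp [pvParse, h1]
      simp [h1, hp, ih]
    · cases h2 : PySem.Int.ofStr? (PySem.Str.strip t) with
      | none =>
        have hp : pvParse t = none := by simp [pvParse, h1, h2]
        simp [h1, hp, ih]
      | some v =>
        have hp : pvParse t = some v := by simp [pvParse, h1, h2]
        simp [h1, hp, ih]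

-- the back-to-front fold, as a foldr
def pvDedupR (l : List Int) : List Int :=
  l.foldr (fun v r => v :: r.filter (fun x => x ≠ v)) []

-- key lemma: first-occurrence dedup (Set.ofList as a foldl of Set.add)
-- equals the back-to-front construction relative to any prefix `acc`.
theorem foldl_add_eq_dedupR (l : List Int) (acc : List Int) :
    l.foldl PySem.Set.add acc = acc ++ (pvDedupR l).filter (fun x => !(acc.contains x)) := by
  induction l generalizing acc with
  | nil => simp [pvDedupR]
  | cons v vs ih =>
    simp only [List.foldl_cons, pvDedupR, List.foldr_cons]
    by_cases hv : v ∈ acc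
    · have hadd : PySem.Set.add acc v = acc := by
        simp [PySem.Set.add, hv]
      rw [hadd, ih acc, List.filter_cons]
      have hc : (!(acc.contains v)) = false := by simp [hv]
      rw [hc]
      simp only [Bool.false_eq_true, if_false]
      rw [List.filter_filter]
      congr 1
      apply List.filter_congr
      intro x _
      by_cases hxa : x ∈ acc
      · simp [hxa]
      · have hxv : x ≠ v := fun h => hxa (h ▸ hv)
        simp [hxa, hxv]
    · have hadd : PySem.Set.add acc v = acc ++ [v] := by
        simp [PySem.Set.add, hv]
      rw [hadd, ih (acc ++ [v]), List.filter_cons]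
      have hc : (!(acc.contains v)) = true := by simp [hv]
      rw [hc]
      simp only [if_true, List.append_assoc, List.singleton_append]
      congr 2
      rw [List.filter_filter]
      apply List.filter_congr
      intro x _
      by_cases hxv : x = v
      · simp [hxv]
      · by_cases hxa : x ∈ acc <;> simp [hxa, hxv]

-- ===== VERDICT (by name: the statement is the Claim_ definition above) =====
theorem seed_list_py_spec : Claim_equal_seed_list_py := by
  intro s _
  unfold Spec_seed_list_py seed_list_py seed_list_py_alt
  set toks := (PySem.Str.split? (PySem.Str.replace s ";" ",") ",").getD [] with htoks
  rw [show (PySem.Set.empty : List Int) = [] from rfl]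
  have hA := pvStepA_loop toks []
  have hB := pvWhileB_eq_foldl toks.reverse []
  rw [congrArg Prod.fst hA, hB]
  rw [List.filterMap_reverse, List.foldl_reverse]
  have h := foldl_add_eq_dedupR (toks.filterMap pvParse) []
  simp only [List.contains_nil, Bool.not_false, List.filter_true, List.nil_append] at h
  rw [h]
  rfl
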